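-- pv_equiv track=rewrite | github.com/dburns7/Research | CRAYFIS/AnalysisCode/plots_old.py | sort_arrs_by_thresh
-- ===== SOURCE A (Python) =====
-- def sort_arrs_by_thresh(xarr, yarr, valarr, thresh):
--   lowx = []
--   lowy = []
--   lowval = []
--   highx = []
--   highy = []
--   highval = []
--   high = False
--   for i in range(0, len(valarr)):
--     for j in range(0, len(valarr[i])):
--       if valarr[i][j] >= thresh:
--         high = True
--       else:
--         high = False
--     if high:
--       highx.append(xarr[i])
--       highy.append(yarr[i])
--       highval.append(valarr[i])
--     else:
--       lowx.append(xarr[i])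
--       lowy.append(yarr[i])
--       lowval.append(valarr[i])
--   return (lowx, lowy, lowval, highx, highy, highval)
-- ===== SOURCE B (Python) =====
-- def sort_arrs_by_thresh(xarr, yarr, valarr, thresh):
--   # One O(1) check per row: A's inner loop only retains the comparison of the
--   # row's LAST element (an empty row keeps the previous flag).  Compute the
--   # flag list in one pass, then partition each array by zipping with the flags.
--   flags = []
--   high = False
--   for row in valarr:
--     if row:
--       high = row[-1] >= thresh
--     flags.append(high)
--   def pick(arr, want):
--     return [v for v, f in zip(arr, flags) if f == want]
--   return (pick(xarr, False), pick(yarr, False), pick(valarr, False),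
--           pick(xarr, True), pick(yarr, True), pick(valarr, True))
-- ===== Notes on version B (the rewrite author's own statement) =====
-- stated objective: faster
-- what changed: Replaces the full inner scan of every row (whose only effect is comparing the row's last element) by a single last-element check per row, building a flag list once and partitioning the three arrays by zipping with it.
import Mathlib
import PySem

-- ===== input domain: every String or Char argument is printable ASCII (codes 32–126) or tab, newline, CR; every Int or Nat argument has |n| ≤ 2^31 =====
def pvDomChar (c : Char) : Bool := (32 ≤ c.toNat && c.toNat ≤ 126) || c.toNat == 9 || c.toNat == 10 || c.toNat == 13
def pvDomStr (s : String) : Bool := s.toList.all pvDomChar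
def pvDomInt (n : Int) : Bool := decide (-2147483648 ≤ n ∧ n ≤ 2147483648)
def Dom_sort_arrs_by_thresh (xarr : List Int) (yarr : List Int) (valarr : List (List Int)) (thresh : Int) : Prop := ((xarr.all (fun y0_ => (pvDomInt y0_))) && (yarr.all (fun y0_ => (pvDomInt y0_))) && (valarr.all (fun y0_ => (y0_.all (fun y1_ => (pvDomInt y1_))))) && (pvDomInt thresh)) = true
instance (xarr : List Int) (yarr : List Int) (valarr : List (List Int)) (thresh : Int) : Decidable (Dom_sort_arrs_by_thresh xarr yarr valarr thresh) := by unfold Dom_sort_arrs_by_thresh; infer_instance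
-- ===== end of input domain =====

-- B replaces A's full inner scan of each row (whose only effect is comparing the
-- row's last element) by one last-element check per row plus a zip-partition: faster.

-- ===== PORT A =====
def sort_arrs_by_thresh (xarr : List Int) (yarr : List Int) (valarr : List (List Int)) (thresh : Int) : List Int × List Int × List (List Int) × List Int × List Int × List (List Int) :=
  let st :=
    (PySem.List.pyRange 0 (valarr.length : Int) 1).foldl
      (fun (st : (List Int × List Int × List (List Int)) × (List Int × List Int × List (List Int)) × Bool) i =>
        -- Python: valarr[i][j] etc.; pyGetD is exact under Pre_ (indices in range)
        let row := PySem.List.pyGetD valarr i []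
        let high := (PySem.List.pyRange 0 (row.length : Int) 1).foldl
            (fun _h j => decide (PySem.List.pyGetD row j 0 ≥ thresh)) st.2.2
        if high then
          (st.1, (st.2.1.1 ++ [PySem.List.pyGetD xarr i 0], st.2.1.2.1 ++ [PySem.List.pyGetD yarr i 0], st.2.1.2.2 ++ [row]), high)
        else
          ((st.1.1 ++ [PySem.List.pyGetD xarr i 0], st.1.2.1 ++ [PySem.List.pyGetD yarr i 0], st.1.2.2 ++ [row]), st.2.1, high))
      (([], [], []), ([], [], []), false)
  (st.1.1, st.1.2.1, st.1.2.2, st.2.1.1, st.2.1.2.1, st.2.1.2.2)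

-- ===== PORT B =====
-- [v for v, f in zip(arr, flags) if f == want]
def pvPick {α : Type} (arr : List α) (flags : List Bool) (want : Bool) : List α :=
  ((arr.zip flags).filter (fun p => p.2 == want)).map (fun p => p.1)

def sort_arrs_by_thresh_alt (xarr : List Int) (yarr : List Int) (valarr : List (List Int)) (thresh : Int) : List Int × List Int × List (List Int) × List Int × List Int × List (List Int) :=
  let flags := (valarr.foldl (fun (st : Bool × List Bool) row =>
      -- Python: if row: high = row[-1] >= thresh  (row[-1] = getLast?)
      let h := match row.getLast? with
               | some v => decide (v ≥ thresh)
               | none => st.1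
      (h, st.2 ++ [h])) (false, ([] : List Bool))).2
  (pvPick xarr flags false, pvPick yarr flags false, pvPick valarr flags false,
   pvPick xarr flags true, pvPick yarr flags true, pvPick valarr flags true)

-- ===== PRECONDITION & SPEC =====
-- Pre_ excludes exactly the inputs where A raises IndexError: xarr or yarr shorter than valarr.
def Pre_sort_arrs_by_thresh (xarr : List Int) (yarr : List Int) (valarr : List (List Int)) (thresh : Int) : Prop :=
  valarr.length ≤ xarr.length ∧ valarr.length ≤ yarr.length
instance (xarr : List Int) (yarr : List Int) (valarr : List (List Int)) (thresh : Int) : Decidable (Pre_sort_arrs_by_thresh xarr yarr valarr thresh) := by unfold Pre_sort_arrs_by_thresh; infer_instance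
def pvWitness_sort_arrs_by_thresh : List Int × List Int × List (List Int) × Int := ([1, 2], [3, 4], [[5], [0]], 3)

def Spec_sort_arrs_by_thresh (xarr : List Int) (yarr : List Int) (valarr : List (List Int)) (thresh : Int) (out : List Int × List Int × List (List Int) × List Int × List Int × List (List Int)) : Prop := out = sort_arrs_by_thresh_alt xarr yarr valarr thresh
instance (xarr : List Int) (yarr : List Int) (valarr : List (List Int)) (thresh : Int) (out : List Int × List Int × List (List Int) × List Int × List Int × List (List Int)) : Decidable (Spec_sort_arrs_by_thresh xarr yarr valarr thresh out) := by unfold Spec_sort_arrs_by_thresh; infer_instance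

-- ===== CLAIM (what is proved, stated in full; the proofs are below) =====
def Claim_equal_sort_arrs_by_thresh : Prop := ∀ (xarr : List Int) (yarr : List Int) (valarr : List (List Int)) (thresh : Int), Dom_sort_arrs_by_thresh xarr yarr valarr thresh → Pre_sort_arrs_by_thresh xarr yarr valarr thresh → Spec_sort_arrs_by_thresh xarr yarr valarr thresh (sort_arrs_by_thresh xarr yarr valarr thresh)

-- ===== LEMMAS AND PROOFS =====

-- structural version of B's flag fold (proof helper)
def pvFlagsRec (valarr : List (List Int)) (thresh : Int) (h : Bool) : List Bool :=
  match valarr with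
  | [] => []
  | row :: vs =>
    let h' := match row.getLast? with
              | some v => decide (v ≥ thresh)
              | none => h
    h' :: pvFlagsRec vs thresh h'

def pvEndFlag (valarr : List (List Int)) (thresh : Int) (h : Bool) : Bool :=
  match valarr with
  | [] => h
  | row :: vs =>
    pvEndFlag vs thresh (match row.getLast? with
                         | some v => decide (v ≥ thresh)
                         | none => h)

theorem flags_fold (thresh : Int) : ∀ (vs : List (List Int)) (h : Bool) (acc : List Bool),
    (vs.foldl (fun (st : Bool × List Bool) row =>
      let h := match row.getLast? with
               | some v => decide (v ≥ thresh)
               | none => st.1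
      (h, st.2 ++ [h])) (h, acc)) = (pvEndFlag vs thresh h, acc ++ pvFlagsRec vs thresh h) := by
  intro vs
  induction vs with
  | nil => intro h acc; simp [pvFlagsRec, pvEndFlag]
  | cons row vs ih =>
    intro h acc
    simp only [List.foldl_cons, pvFlagsRec, pvEndFlag, ih, List.append_assoc, List.singleton_append]

theorem inner_flag (thresh : Int) (row : List Int) (h0 : Bool) :
    (PySem.List.pyRange 0 (row.length : Int) 1).foldl
        (fun _h j => decide (PySem.List.pyGetD row j 0 ≥ thresh)) h0
      = match row.getLast? with
        | some v => decide (v ≥ thresh)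
        | none => h0 := by
  rw [PySem.List.foldl_pyRange_zero_pyGetD' row 0 (fun _h v => decide (v ≥ thresh)) h0]
  induction row generalizing h0 with
  | nil => rfl
  | cons a rest ih =>
    cases rest with
    | nil => rfl
    | cons b r => simpa using ih (decide (a ≥ thresh))

theorem pick_cons {α : Type} (a : α) (arr : List α) (f : Bool) (fs : List Bool) (want : Bool) :
    pvPick (a :: arr) (f :: fs) want
      = (if f = want then [a] else []) ++ pvPick arr fs want := by
  simp only [pvPick, List.zip_cons_cons, List.filter_cons]
  by_cases hw : f = want <;> simp [hw]

-- Main loop invariant: A's fold from index k equals appending the zip-partition of the drops.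
theorem loopA (xarr yarr : List Int) (valarr : List (List Int)) (thresh : Int)
    (hx : valarr.length ≤ xarr.length) (hy : valarr.length ≤ yarr.length) :
    ∀ (n k : Nat), k + n = valarr.length →
    ∀ (lx ly : List Int) (lv : List (List Int)) (hxs hys : List Int) (hvs : List (List Int)) (h : Bool),
    (PySem.List.pyRange (k : Int) (valarr.length : Int) 1).foldl
      (fun (st : (List Int × List Int × List (List Int)) × (List Int × List Int × List (List Int)) × Bool) i =>
        let row := PySem.List.pyGetD valarr i []
        let high := (PySem.List.pyRange 0 (row.length : Int) 1).foldl
            (fun _h j => decide (PySem.List.pyGetD row j 0 ≥ thresh)) st.2.2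
        if high then
          (st.1, (st.2.1.1 ++ [PySem.List.pyGetD xarr i 0], st.2.1.2.1 ++ [PySem.List.pyGetD yarr i 0], st.2.1.2.2 ++ [row]), high)
        else
          ((st.1.1 ++ [PySem.List.pyGetD xarr i 0], st.1.2.1 ++ [PySem.List.pyGetD yarr i 0], st.1.2.2 ++ [row]), st.2.1, high))
      ((lx, ly, lv), (hxs, hys, hvs), h)
    = (((lx ++ pvPick (xarr.drop k) (pvFlagsRec (valarr.drop k) thresh h) false,
         ly ++ pvPick (yarr.drop k) (pvFlagsRec (valarr.drop k) thresh h) false,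
         lv ++ pvPick (valarr.drop k) (pvFlagsRec (valarr.drop k) thresh h) false),
        (hxs ++ pvPick (xarr.drop k) (pvFlagsRec (valarr.drop k) thresh h) true,
         hys ++ pvPick (yarr.drop k) (pvFlagsRec (valarr.drop k) thresh h) true,
         hvs ++ pvPick (valarr.drop k) (pvFlagsRec (valarr.drop k) thresh h) true),
        pvEndFlag (valarr.drop k) thresh h)) := by
  intro n
  induction n with
  | zero =>
    intro k hk lx ly lv hxs hys hvs h
    have hkv : k = valarr.length := by omega
    subst hkv
    rw [PySem.List.pyRange_one_eq_nil (by omega)]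
    simp [List.drop_of_length_le (le_refl _),
      pvFlagsRec, pvEndFlag, pvPick]
  | succ n ih =>
    intro k hk lx ly lv hxs hys hvs h
    have hkv : k < valarr.length := by omega
    have hkx : k < xarr.length := by omega
    have hky : k < yarr.length := by omega
    rw [PySem.List.pyRange_one_cons (by exact_mod_cast hkv)]
    simp only [List.foldl_cons]
    have hrow : PySem.List.pyGetD valarr (k : Int) [] = valarr[k] := by
      rw [PySem.List.pyGetD_natCast]; simp [List.getD, hkv]
    have hxg : PySem.List.pyGetD xarr (k : Int) 0 = xarr[k] := by
      rw [PySem.List.pyGetD_natCast]; simp [List.getD, hkx]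
    have hyg : PySem.List.pyGetD yarr (k : Int) 0 = yarr[k] := by
      rw [PySem.List.pyGetD_natCast]; simp [List.getD, hky]
    have hdv : valarr.drop k = valarr[k] :: valarr.drop (k + 1) := List.drop_eq_getElem_cons hkv
    have hdx : xarr.drop k = xarr[k] :: xarr.drop (k + 1) := List.drop_eq_getElem_cons hkx
    have hdy : yarr.drop k = yarr[k] :: yarr.drop (k + 1) := List.drop_eq_getElem_cons hky
    have hcast : ((k : Int) + 1) = ((k + 1 : Nat) : Int) := by push_cast; ring
    rw [hrow, hxg, hyg, inner_flag]
    set h' := (match valarr[k].getLast? with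
               | some v => decide (v ≥ thresh)
               | none => h) with hh'
    rw [hdv, hdx, hdy]
    simp only [pvFlagsRec, pvEndFlag, ← hh', pick_cons]
    cases h' with
    | false =>
      simp only [if_neg (by decide : ¬ (false : Bool) = true)]
      rw [hcast, ih (k + 1) (by omega)]
      simp [List.append_assoc]
    | true =>
      rw [hcast, ih (k + 1) (by omega)]
      simp [List.append_assoc]

-- ===== VERDICT (by name: the statement is the Claim_ definition above) =====
theorem sort_arrs_by_thresh_spec : Claim_equal_sort_arrs_by_thresh := by
  intro xarr yarr valarr thresh _hd hpre
  obtain ⟨hx, hy⟩ := hpre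
  unfold Spec_sort_arrs_by_thresh sort_arrs_by_thresh sort_arrs_by_thresh_alt
  rw [flags_fold]
  have h0 : ((0 : Nat) : Int) = (0 : Int) := rfl
  have := loopA xarr yarr valarr thresh hx hy valarr.length 0 (by omega) [] [] [] [] [] [] false
  rw [h0] at this
  rw [this]
  simp
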